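-- pv_equiv track=rewrite | github.com/limes-eq/pyEQLogParser | eqlogparser/stats_util.py | parse_uint
-- ===== SOURCE A (Python) =====
-- UINT_MAX = 2**32 - 1
--
-- def parse_uint(s: str, default: int = UINT_MAX) -> int:
--     if not s:
--         return default
--     result = 0
--     for c in s:
--         if not c.isdigit():
--             return default
--         result = result * 10 + ord(c) - 48
--     return result
-- ===== SOURCE B (Python) =====
-- UINT_MAX = 2**32 - 1
--
-- def parse_uint(s: str, default: int = UINT_MAX) -> int:
--     # validate once; '' is not a digit string, covering the empty case
--     if not s.isdigit():
--         return default
--     # positional evaluation, least-significant digit first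
--     value = 0
--     power = 1
--     for c in reversed(s):
--         value += (ord(c) - 48) * power
--         power *= 10
--     return value
-- ===== Notes on version B (the rewrite author's own statement) =====
-- stated objective: alternative
-- what changed: A fuses validation with a left-to-right Horner accumulation (result*10+digit, early return on a non-digit); B validates once with str.isdigit and then evaluates the numeral right-to-left, adding each digit times an explicit power-of-ten accumulator.
import Mathlib
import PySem

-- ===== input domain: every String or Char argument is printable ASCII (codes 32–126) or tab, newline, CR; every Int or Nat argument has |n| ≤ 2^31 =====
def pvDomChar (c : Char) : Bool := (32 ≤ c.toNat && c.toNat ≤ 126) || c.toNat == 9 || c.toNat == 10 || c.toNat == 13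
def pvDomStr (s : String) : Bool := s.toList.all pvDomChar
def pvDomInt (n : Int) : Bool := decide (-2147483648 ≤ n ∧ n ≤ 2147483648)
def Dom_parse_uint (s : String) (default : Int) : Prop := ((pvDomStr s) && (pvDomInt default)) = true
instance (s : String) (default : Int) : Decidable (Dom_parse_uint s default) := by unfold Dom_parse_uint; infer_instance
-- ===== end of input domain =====

-- B validates once, then evaluates the numeral right-to-left with a power-of-ten accumulator instead of A's fused Horner loop. Objective: alternative.

-- ===== PORT A =====
-- the fused loop: early return of `default` on the first non-digit, else Horner accumulation
def parseUintLoopA (default : Int) : List Char → Int → Int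
  | [], result => result
  | c :: cs, result =>
    if !PySem.Chars.isdigit c then default
    else parseUintLoopA default cs (result * 10 + (c.toNat : Int) - 48)

def parse_uint (s : String) (default : Int) : Int :=
  if s.toList.isEmpty then default
  else parseUintLoopA default s.toList 0

-- ===== PORT B =====
-- positional evaluation over the reversed digits: state = (value, power)
def parseUintLoopB : List Char → Int × Int → Int × Int
  | [], st => st
  | c :: cs, (v, p) => parseUintLoopB cs (v + ((c.toNat : Int) - 48) * p, p * 10)

def parse_uint_alt (s : String) (default : Int) : Int :=
  if !PySem.Str.strIsdigit s then default
  else (parseUintLoopB s.toList.reverse (0, 1)).1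

-- ===== PRECONDITION & SPEC =====
def Spec_parse_uint (s : String) (default : Int) (out : Int) : Prop := out = parse_uint_alt s default
instance (s : String) (default : Int) (out : Int) : Decidable (Spec_parse_uint s default out) := by unfold Spec_parse_uint; infer_instance

-- ===== CLAIM (what is proved, stated in full; the proofs are below) =====
def Claim_equal_parse_uint : Prop := ∀ (s : String) (default : Int), Dom_parse_uint s default → Spec_parse_uint s default (parse_uint s default)

-- ===== LEMMAS AND PROOFS =====
-- value of a digit list read least-significant digit first
def lsdVal : List Char → Int
  | [] => 0
  | c :: cs => ((c.toNat : Int) - 48) + 10 * lsdVal cs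

theorem parseUintLoopB_fst (cs : List Char) (v p : Int) :
    (parseUintLoopB cs (v, p)).1 = v + p * lsdVal cs := by
  induction cs generalizing v p with
  | nil => simp [parseUintLoopB, lsdVal]
  | cons c cs ih => simp [parseUintLoopB, lsdVal, ih]; ring

theorem lsdVal_append (a b : List Char) :
    lsdVal (a ++ b) = lsdVal a + 10 ^ a.length * lsdVal b := by
  induction a with
  | nil => simp [lsdVal]
  | cons c cs ih => simp [lsdVal, ih, pow_succ]; ring

theorem parseUintLoopA_eq (default : Int) (cs : List Char) (r : Int) :
    parseUintLoopA default cs r =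
      if cs.all PySem.Chars.isdigit = true then r * 10 ^ cs.length + lsdVal cs.reverse
      else default := by
  induction cs generalizing r with
  | nil => simp [parseUintLoopA, lsdVal]
  | cons c cs ih =>
    by_cases h : PySem.Chars.isdigit c
    · simp [parseUintLoopA, h, ih, lsdVal_append, lsdVal, pow_succ]
      split_ifs <;> ring
    · simp [parseUintLoopA, h]

-- ===== VERDICT (by name: the statement is the Claim_ definition above) =====
theorem parse_uint_spec : Claim_equal_parse_uint := by
  intro s default _
  unfold Spec_parse_uint parse_uint parse_uint_alt
  rw [PySem.Str.strIsdigit_eq]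
  unfold PySem.Chars.strIsdigit
  by_cases he : s.toList.isEmpty
  · simp [he]
  · rw [if_neg he, parseUintLoopA_eq, parseUintLoopB_fst]
    by_cases hd : s.toList.all PySem.Chars.isdigit
    · simp [hd, he]
    · simp [hd]
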